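-- pv_equiv track=rewrite | github.com/tdimhcsleumas/AdventOfCode | day8/day8-2.py | calcCandidateLists
-- ===== SOURCE A (Python) =====
-- def calcCandidateLists(sets):
--   if len(sets) == 0: return [[]]
--   currentSet = sets[0]
--   candidateLists = []
--
--   first, second = currentSet
--
--   optionLists = calcCandidateLists(sets[1:]).copy()
--   for optionList in optionLists:
--     temp1 = optionList.copy()
--     temp1.insert(0, first)
--     temp1.insert(0, second)
--     candidateLists.append(temp1)
--
--     temp2 = optionList.copy()
--     temp2.insert(0, second)
--     temp2.insert(0, first)
--     candidateLists.append(temp2)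
--
--   return candidateLists
-- ===== SOURCE B (Python) =====
-- def calcCandidateLists(sets):
--     acc = [[]]
--     for first, second in reversed(sets):
--         acc = [pre + ol for ol in acc for pre in ([second, first], [first, second])]
--     return acc
-- ===== Notes on version B (the rewrite author's own statement) =====
-- stated objective: alternative
-- what changed: Replaced the recursion with an iterative fold: start from the singleton accumulator containing the empty list and traverse the sets last-to-first, expanding the accumulator with a flat comprehension that prefixes each variant, instead of recursing on the tail and building each list with copy/insert.
import Mathlib
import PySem

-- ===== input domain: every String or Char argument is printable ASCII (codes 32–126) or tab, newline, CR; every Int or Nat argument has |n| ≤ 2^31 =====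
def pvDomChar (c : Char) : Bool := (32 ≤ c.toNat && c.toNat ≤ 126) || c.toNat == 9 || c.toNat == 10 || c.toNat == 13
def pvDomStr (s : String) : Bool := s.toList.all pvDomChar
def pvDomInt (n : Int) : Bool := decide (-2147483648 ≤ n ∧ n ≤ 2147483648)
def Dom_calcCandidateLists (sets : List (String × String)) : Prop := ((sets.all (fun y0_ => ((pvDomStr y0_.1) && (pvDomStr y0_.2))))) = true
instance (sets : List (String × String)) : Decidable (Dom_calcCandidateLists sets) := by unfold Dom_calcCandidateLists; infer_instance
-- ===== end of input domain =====

-- B replaces A's recursion with an iterative last-to-first fold that expands an accumulator (alternative decomposition, same cost).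
-- ===== PORT A =====
def calcCandidateLists : List (String × String) → List (List String)
  | [] => [[]]
  | currentSet :: rest =>
    let first := currentSet.1
    let second := currentSet.2
    let optionLists := calcCandidateLists rest
    optionLists.foldl (fun candidateLists optionList =>
      (candidateLists ++ [second :: first :: optionList]) ++ [first :: second :: optionList]) []

-- ===== PORT B =====
-- B: iterative fold over reversed sets, expanding the accumulator by a flat comprehension
def calcCandidateLists_alt (sets : List (String × String)) : List (List String) :=
  sets.reverse.foldl (fun acc p =>
    acc.flatMap (fun ol => [p.2 :: p.1 :: ol, p.1 :: p.2 :: ol])) [[]]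

-- ===== PRECONDITION & SPEC =====
def Spec_calcCandidateLists (sets : List (String × String)) (out : List (List String)) : Prop := out = calcCandidateLists_alt sets
instance (sets : List (String × String)) (out : List (List String)) : Decidable (Spec_calcCandidateLists sets out) := by unfold Spec_calcCandidateLists; infer_instance

-- ===== CLAIM (what is proved, stated in full; the proofs are below) =====
def Claim_equal_calcCandidateLists : Prop := ∀ (sets : List (String × String)), Dom_calcCandidateLists sets → Spec_calcCandidateLists sets (calcCandidateLists sets)

-- ===== LEMMAS AND PROOFS =====

theorem foldl_app2 (l : List (List String)) (f g : List String → List String) (acc : List (List String)) :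
    l.foldl (fun c ol => (c ++ [f ol]) ++ [g ol]) acc = acc ++ l.flatMap (fun ol => [f ol, g ol]) := by
  induction l generalizing acc with
  | nil => simp
  | cons x xs ih => simp [List.foldl, ih, List.flatMap]

theorem ports_agree (sets : List (String × String)) :
    calcCandidateLists sets = calcCandidateLists_alt sets := by
  induction sets with
  | nil => rfl
  | cons p rest ih =>
    simp only [calcCandidateLists, calcCandidateLists_alt, List.reverse_cons,
      List.foldl_append, List.foldl_cons, List.foldl_nil] at *
    rw [foldl_app2, ih]
    simp

-- ===== VERDICT =====
theorem calcCandidateLists_spec : Claim_equal_calcCandidateLists := by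
  intro sets _
  exact ports_agree sets
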